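-- pv_equiv track=rewrite | github.com/GANESH-ICMC/Apresentacoes | Aulas/Frentes/Criptografia/Cifras de substituição/frequencia.py | calculaFrequencias
-- ===== SOURCE A (Python) =====
-- def calculaFrequencias(mensagem, tamBloco):
--     frequencia = {}
--     for i in range(len(mensagem)-tamBloco+1):
--         if ' ' not in (mensagem[i:i+tamBloco]):
--             bloco = mensagem[i:i+tamBloco]
--             if bloco in frequencia:
--                 frequencia[bloco] += 1
--             else:
--                 frequencia[bloco] = 1
--     return frequencia
-- ===== SOURCE B (Python) =====
-- def calculaFrequencias(mensagem, tamBloco):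
--     blocos = [trecho[j:j+tamBloco]
--               for trecho in mensagem.split(' ')
--               for j in range(len(trecho) - tamBloco + 1)]
--     return {b: blocos.count(b) for b in dict.fromkeys(blocos)}
-- ===== Notes on version B (the rewrite author's own statement) =====
-- stated objective: alternative
-- what changed: B is two staged passes with different data structures: it first materialises the list of all space-free blocks (by splitting on ' ' and slicing each run), then builds the result as a comprehension {b: blocos.count(b)} over the first-seen-distinct blocks, instead of A's single pass that scans every window of the whole message for a space and updates a counter dict in place.
-- outside the precondition, e.g. on calculaFrequencias('a b', -1): A returns {'': 4}, B returns {'': 6}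
import Mathlib
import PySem

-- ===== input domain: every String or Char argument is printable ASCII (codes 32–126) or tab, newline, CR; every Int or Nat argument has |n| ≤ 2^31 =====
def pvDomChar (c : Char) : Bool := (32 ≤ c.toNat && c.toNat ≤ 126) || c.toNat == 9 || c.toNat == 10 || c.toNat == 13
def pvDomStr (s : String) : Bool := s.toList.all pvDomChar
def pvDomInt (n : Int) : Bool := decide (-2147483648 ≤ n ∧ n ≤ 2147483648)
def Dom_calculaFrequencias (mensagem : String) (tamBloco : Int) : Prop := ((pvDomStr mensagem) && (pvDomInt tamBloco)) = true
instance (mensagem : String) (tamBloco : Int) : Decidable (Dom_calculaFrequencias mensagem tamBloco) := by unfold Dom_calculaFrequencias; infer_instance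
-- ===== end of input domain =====

-- B builds the list of space-free blocks in one staged pass (split on ' ', slice each run)
-- and returns {b: blocos.count(b)} over first-seen-distinct blocks, instead of A's single
-- window scan with an in-place counter dict (objective: alternative; return value only).


-- ===== PORT A =====
def calculaFrequencias (mensagem : String) (tamBloco : Int) : List (String × Int) :=
  ((PySem.List.pyRange 0 (PySem.Str.len mensagem - tamBloco + 1) 1).foldl
    (fun frequencia i =>
      if !(PySem.Str.isIn " " (PySem.Str.slice mensagem (some i) (some (i + tamBloco)))) then
        let bloco := PySem.Str.slice mensagem (some i) (some (i + tamBloco))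
        if frequencia.contains bloco then frequencia.insert bloco (frequencia.getD bloco 0 + 1)
        else frequencia.insert bloco 1
      else frequencia)
    PySem.Dict.empty).items

-- ===== PORT B =====
def calculaFrequencias_alt (mensagem : String) (tamBloco : Int) : List (String × Int) :=
  let blocos :=
    ((PySem.Str.split? mensagem " ").getD []).flatMap
      (fun trecho =>
        (PySem.List.pyRange 0 (PySem.Str.len trecho - tamBloco + 1) 1).map
          (fun j => PySem.Str.slice trecho (some j) (some (j + tamBloco))))
  ((PySem.List.dedup blocos).foldl
      (fun d b => d.insert b ((PySem.List.count blocos b : Int)))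
      PySem.Dict.empty).items

-- ===== PRECONDITION & SPEC =====
-- Pre_ restricts to the natural domain tamBloco ≥ 0: a negative block size makes A count
-- negative-slice windows that can cross spaces, outside the task's meaning.
def Pre_calculaFrequencias (mensagem : String) (tamBloco : Int) : Prop := 0 ≤ tamBloco
instance (mensagem : String) (tamBloco : Int) : Decidable (Pre_calculaFrequencias mensagem tamBloco) := by unfold Pre_calculaFrequencias; infer_instance
def pvWitness_calculaFrequencias : String × Int := ("ab ba ab", 2)

def Spec_calculaFrequencias (mensagem : String) (tamBloco : Int) (out : List (String × Int)) : Prop := out = calculaFrequencias_alt mensagem tamBloco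
instance (mensagem : String) (tamBloco : Int) (out : List (String × Int)) : Decidable (Spec_calculaFrequencias mensagem tamBloco out) := by unfold Spec_calculaFrequencias; infer_instance

-- ===== CLAIM (what is proved, stated in full; the proofs are below) =====
def Claim_equal_calculaFrequencias : Prop := ∀ (mensagem : String) (tamBloco : Int), Dom_calculaFrequencias mensagem tamBloco → Pre_calculaFrequencias mensagem tamBloco → Spec_calculaFrequencias mensagem tamBloco (calculaFrequencias mensagem tamBloco)

-- ===== LEMMAS AND PROOFS =====

-- all windows of length t (a window per start index 0 .. len-t)
def pvW (t : Nat) (l : List Char) : List (List Char) :=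
  (List.range (l.length + 1 - t)).map (fun i => (l.drop i).take t)

theorem pvW_nil_of_lt {t : Nat} {l : List Char} (h : l.length < t) : pvW t l = [] := by
  unfold pvW
  have : l.length + 1 - t = 0 := by omega
  simp [this]

theorem pvW_cons {t : Nat} {c : Char} {l : List Char} (h : t ≤ l.length + 1) :
    pvW t (c :: l) = (c :: l).take t :: pvW t l := by
  unfold pvW
  have : (c :: l).length + 1 - t = (l.length + 1 - t) + 1 := by simp; omega
  rw [this, List.range_succ_eq_map]
  simp [List.map_map, Function.comp]

-- [' '] contained in w iff ' ' is a member
theorem pvIsIn_single (w : List Char) : PySem.Chars.isIn [' '] w = w.contains ' ' := by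
  by_cases h : (' ' : Char) ∈ w
  · have : PySem.Chars.isIn [' '] w = true := by
      rw [PySem.Chars.isIn_iff_infix]
      obtain ⟨s, u, rfl⟩ := List.append_of_mem h
      exact ⟨s, u, by simp⟩
    rw [this, eq_comm, List.contains_iff_mem.mpr h]
  · have : PySem.Chars.isIn [' '] w = false := by
      rw [← Bool.not_eq_true, PySem.Chars.isIn_iff_infix]
      intro hinf
      exact h (hinf.mem (by simp))
    rw [this, eq_comm, ← Bool.not_eq_true, List.contains_iff_mem]
    exact h

-- head of splitOnP is the takeWhile-prefix
theorem pvHead_splitOnP (p : Char → Bool) (l : List Char) :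
    (List.splitOnP p l).head? = some (l.takeWhile (fun a => !p a)) := by
  induction l with
  | nil => simp [List.splitOnP_nil]
  | cons c xs ih =>
    rw [List.splitOnP_cons]
    by_cases hc : p c
    · simp [hc]
    · rw [if_neg hc, List.head?_modifyHead, ih]
      simp [hc]

theorem pvSplit_cons_decomp (p : Char → Bool) (c : Char) (xs : List Char) (hc : p c = false) :
    ∃ rs, List.splitOnP p (c :: xs) = (c :: xs.takeWhile (fun a => !p a)) :: rs ∧
          List.splitOnP p xs = (xs.takeWhile (fun a => !p a)) :: rs := by
  obtain ⟨r, rs, hsplit⟩ := List.exists_cons_of_ne_nil (List.splitOnP_ne_nil p xs)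
  have hr : r = xs.takeWhile (fun a => !p a) := by
    have := pvHead_splitOnP p xs
    rw [hsplit] at this; simpa using this
  refine ⟨rs, ?_, by rw [hsplit, hr]⟩
  rw [List.splitOnP_cons, hc, hsplit, hr]
  simp [List.modifyHead]

theorem pvDropWhile_head {p : Char → Bool} :
    ∀ {l : List Char} {d : Char} {ys : List Char}, l.dropWhile p = d :: ys → p d = false := by
  intro l
  induction l with
  | nil => intro d ys h; simp [List.dropWhile] at h
  | cons a l ih =>
    intro d ys h
    by_cases hp : p a
    · rw [List.dropWhile_cons_of_pos hp] at h
      exact ih h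
    · rw [List.dropWhile_cons_of_neg hp] at h
      cases h
      simpa using hp

-- main window/run correspondence, t ≥ 1
theorem pvMain {t : Nat} (ht : 1 ≤ t) (l : List Char) :
    (pvW t l).filter (fun w => !w.contains ' ') =
      (List.splitOnP (· == ' ') l).flatMap (pvW t) := by
  induction l with
  | nil =>
    rw [pvW_nil_of_lt (show ([]:List Char).length < t by simp; omega), List.splitOnP_nil]
    simp [pvW_nil_of_lt (show ([]:List Char).length < t by simp; omega)]
  | cons c xs ih =>
    by_cases hc : c = ' '
    · subst hc
      rw [List.splitOnP_cons]
      simp only [BEq.rfl, if_pos, List.flatMap_cons]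
      rw [pvW_nil_of_lt (show ([]:List Char).length < t by simp; omega), List.nil_append]
      by_cases hlen : t ≤ xs.length + 1
      · rw [pvW_cons hlen]
        have hwin : ((' ' :: xs).take t).contains ' ' = true := by
          rcases Nat.exists_eq_add_of_le ht with ⟨k, rfl⟩
          rw [Nat.add_comm 1 k, List.take_succ_cons, List.contains_iff_mem]
          exact List.mem_cons_self
        rw [List.filter_cons, hwin]
        simpa using ih
      · rw [pvW_nil_of_lt (show (' ' :: xs).length < t by simp; omega)]
        rw [pvW_nil_of_lt (show xs.length < t by omega)] at ih
        simpa using ih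
    · have hcb : ((c == ' ') : Bool) = false := by simp [hc]
      obtain ⟨rs, hsc, hsx⟩ := pvSplit_cons_decomp (· == ' ') c xs hcb
      set r := xs.takeWhile (fun a => !(a == ' ')) with hrdef
      have hrpre : r <+: xs := List.takeWhile_prefix _
      have hrlen : r.length ≤ xs.length := hrpre.length_le
      rw [hsc, List.flatMap_cons]
      rw [hsx, List.flatMap_cons] at ih
      by_cases hlen : t ≤ r.length + 1
      · -- window fits inside the first run
        have hxlen : t ≤ xs.length + 1 := by omega
        have htake : xs.take (t - 1) = r.take (t - 1) := by
          obtain ⟨s, hs⟩ := hrpre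
          rw [← hs, List.take_append_of_le_length (by omega)]
        have hwin_eq : (c :: xs).take t = (c :: r).take t := by
          rcases Nat.exists_eq_add_of_le ht with ⟨k, rfl⟩
          rw [Nat.add_comm 1 k] at htake ⊢
          rw [show k + 1 - 1 = k from by omega] at htake
          simp [List.take_succ_cons, htake]
        have hwin_free : (((c :: xs).take t).contains ' ') = false := by
          rw [hwin_eq, ← Bool.not_eq_true, List.contains_iff_mem]
          intro hmem
          have hmem2 : (' ' : Char) ∈ c :: r := List.mem_of_mem_take hmem
          rcases List.mem_cons.mp hmem2 with hh | hh
          · exact hc hh.symm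
          · have h2 := List.mem_takeWhile_imp hh
            simp at h2
        rw [pvW_cons hxlen, List.filter_cons, hwin_free]
        rw [pvW_cons (show t ≤ r.length + 1 from hlen), ← hwin_eq]
        simp only [Bool.not_false, if_pos, List.cons_append]
        rw [ih]
      · -- first run shorter than the window: the window (if any) crosses a space
        have hWr : pvW t r = [] := pvW_nil_of_lt (by omega)
        have hWcr : pvW t (c :: r) = [] := pvW_nil_of_lt (by simp; omega)
        rw [hWcr, List.nil_append]
        rw [hWr, List.nil_append] at ih
        by_cases hxlen : t ≤ xs.length + 1
        · have hne : xs.dropWhile (fun a => !(a == ' ')) ≠ [] := by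
            intro hnil
            have hlen2 : r.length = xs.length := by
              rw [hrdef]
              conv_rhs => rw [← List.takeWhile_append_dropWhile (p := fun a => !(a == ' ')) (l := xs)]
              rw [hnil, List.append_nil]
            omega
          obtain ⟨d, ys, hd⟩ := List.exists_cons_of_ne_nil hne
          have hdsp : d = ' ' := by
            have := pvDropWhile_head hd
            simpa using this
          have hxs : xs = r ++ ' ' :: ys := by
            conv_lhs => rw [← List.takeWhile_append_dropWhile (p := fun a => !(a == ' ')) (l := xs)]
            rw [hd, hdsp, hrdef]
          have hwin : (((c :: xs).take t).contains ' ') = true := by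
            rcases Nat.exists_eq_add_of_le ht with ⟨k, rfl⟩
            rw [Nat.add_comm 1 k, List.take_succ_cons, List.contains_iff_mem]
            rw [hxs, List.take_append]
            have h1 : 1 ≤ k - r.length := by omega
            rcases Nat.exists_eq_add_of_le h1 with ⟨m, hm⟩
            right
            apply List.mem_append_right
            rw [show k - r.length = m + 1 from by omega, List.take_succ_cons]
            exact List.mem_cons_self
          rw [pvW_cons hxlen, List.filter_cons, hwin]
          simpa using ih
        · rw [pvW_nil_of_lt (show (c :: xs).length < t by simp; omega)]
          rw [pvW_nil_of_lt (show xs.length < t by omega)] at ih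
          simpa using ih

-- the t = 0 case: every side is a run of empty windows of the same length
theorem pvRep (l : List Char) :
    (List.splitOnP (· == ' ') l).flatMap (fun r => List.replicate (r.length + 1) ([] : List Char)) =
      List.replicate (l.length + 1) [] := by
  induction l with
  | nil => simp [List.splitOnP_nil]
  | cons c xs ih =>
    by_cases hc : c = ' '
    · subst hc
      rw [List.splitOnP_cons]
      simp only [BEq.rfl, if_pos, List.flatMap_cons, ih]
      simp [List.replicate_succ]
    · have hcb : ((c == ' ') : Bool) = false := by simp [hc]
      obtain ⟨rs, hsc, hsx⟩ := pvSplit_cons_decomp (· == ' ') c xs hcb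
      set r := xs.takeWhile (fun a => !(a == ' ')) with hrdef
      have hrlen : r.length ≤ xs.length := (List.takeWhile_prefix _).length_le
      rw [hsx, List.flatMap_cons] at ih
      have hrest : rs.flatMap (fun r => List.replicate (r.length + 1) ([] : List Char)) =
          List.replicate (xs.length - r.length) [] := by
        have h := congrArg (List.drop (r.length + 1)) ih
        rw [List.drop_append_of_le_length (by simp)] at h
        simp only [List.drop_replicate] at h
        rw [show xs.length + 1 - (r.length + 1) = xs.length - r.length from by omega] at h
        simpa using h
      rw [hsc, List.flatMap_cons, hrest]
      rw [show (c :: r).length + 1 = r.length + 2 from by simp]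
      rw [show (c :: xs).length + 1 = (r.length + 2) + (xs.length - r.length) from by simp; omega]
      simp [List.append_assoc]

theorem pvW_zero (l : List Char) : pvW 0 l = List.replicate (l.length + 1) [] := by
  unfold pvW
  simp [List.map_const']

theorem pvBlocks (t : Nat) (l : List Char) :
    (pvW t l).filter (fun w => !w.contains ' ') =
      (List.splitOnP (· == ' ') l).flatMap (pvW t) := by
  rcases Nat.eq_zero_or_pos t with h0 | h1
  · subst h0
    rw [pvW_zero, List.filter_eq_self.mpr (by intro a ha; simp [List.eq_of_mem_replicate ha])]
    have hfun : pvW 0 = fun r : List Char => List.replicate (r.length + 1) [] := funext pvW_zero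
    rw [hfun]
    exact (pvRep l).symm
  · exact pvMain h1 l

theorem pvModifyHead_comp (f g : List Char → List Char) (L : List (List Char)) :
    (L.modifyHead g).modifyHead f = L.modifyHead (fun h => f (g h)) := by
  cases L <;> simp [List.modifyHead]

theorem pvGo (c : Char) :
    ∀ (fuel : Nat) (l cur : List Char) (accs : List (List Char)),
      l.length < fuel →
      PySem.Chars.splitOn.go [c] fuel l cur accs =
        accs.reverse ++ (List.splitOnP (· == c) l).modifyHead (fun h => cur.reverse ++ h) := by
  intro fuel
  induction fuel with
  | zero => intro l cur accs h; omega
  | succ fuel ih =>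
    intro l cur accs h
    cases l with
    | nil =>
      simp [PySem.Chars.splitOn.go, List.splitOnP_nil, List.modifyHead]
    | cons x rest =>
      rw [show PySem.Chars.splitOn.go [c] (fuel + 1) (x :: rest) cur accs =
            if [c].isPrefixOf (x :: rest) then
              PySem.Chars.splitOn.go [c] fuel (List.drop ([c] : List Char).length (x :: rest)) [] (cur.reverse :: accs)
            else PySem.Chars.splitOn.go [c] fuel rest (x :: cur) accs from rfl]
      by_cases hx : x = c
      · subst hx
        have hpre : ([x] : List Char).isPrefixOf (x :: rest) = true := by
          simp [List.isPrefixOf]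
        rw [hpre, if_pos rfl]
        rw [ih _ [] (cur.reverse :: accs) (by simp at h ⊢; omega)]
        rw [List.splitOnP_cons]
        simp only [BEq.rfl, if_pos]
        rw [List.modifyHead]
        simp only [List.reverse_cons, List.append_assoc, List.nil_append, List.reverse_nil]
        cases hsp : List.splitOnP (fun y => y == x) rest <;> simp [List.modifyHead, hsp]
      · have hpre : ([c] : List Char).isPrefixOf (x :: rest) = false := by
          simp [List.isPrefixOf]
          intro hcx; exact absurd hcx.symm hx
        rw [hpre, if_neg (by simp)]
        rw [ih rest (x :: cur) accs (by simp at h ⊢; omega)]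
        rw [List.splitOnP_cons]
        have hxc : ((x == c) : Bool) = false := by simp [hx]
        rw [hxc, if_neg (by simp)]
        rw [pvModifyHead_comp]
        simp [List.reverse_cons, List.append_assoc]

-- PySem splitOn with a single-character separator is List.splitOnP
theorem pvSplitOn_single (c : Char) (l : List Char) :
    PySem.Chars.splitOn l [c] = List.splitOnP (· == c) l := by
  unfold PySem.Chars.splitOn
  rw [pvGo c (l.length + 1) l [] [] (by omega)]
  cases h : List.splitOnP (· == c) l <;> simp_all [List.modifyHead]

theorem pvRange (n t : Nat) :
    PySem.List.pyRange 0 ((n : Int) - (t : Int) + 1) 1 =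
      (List.range (n + 1 - t)).map (fun k : Nat => (k : Int)) := by
  rw [PySem.List.pyRange_one]
  rw [show (((n : Int) - (t : Int) + 1) - 0).toNat = n + 1 - t from by omega]
  simp only [zero_add]

theorem pvSliceStr (s : String) (i t : Nat) :
    PySem.Str.slice s (some (i : Int)) (some ((i : Int) + (t : Int))) =
      String.ofList ((s.toList.drop i).take t) := by
  unfold PySem.Str.slice
  rw [PySem.Chars.slice_eq_listSlice, PySem.List.slice_natCast_add]

-- A's branch pair is the counter update
theorem pvStepA (d : PySem.Dict String Int) (s : String) :
    (if d.contains s then d.insert s (d.getD s 0 + 1) else d.insert s 1) =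
      d.insert s (d.getD s 0 + 1) := by
  by_cases h : d.contains s
  · rw [if_pos h]
  · rw [if_neg h, PySem.Dict.getD_of_not_contains d 0 (by simpa using h)]
    norm_num

theorem pvFoldl_if_filter {α β : Type} (f : β → α → β) (p : α → Bool) :
    ∀ (xs : List α) (init : β),
      xs.foldl (fun b a => if p a then f b a else b) init = (xs.filter p).foldl f init := by
  intro xs
  induction xs with
  | nil => intro init; rfl
  | cons x xs ih =>
    intro init
    by_cases h : p x <;> simp [h, ih]

-- A is Counter(space-free windows)
theorem pvA_eq (m : String) (t : Nat) :
    calculaFrequencias m (t : Int) =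
      (PySem.Dict.counter (((pvW t m.toList).filter (fun w => !w.contains ' ')).map
        String.ofList)).items := by
  unfold calculaFrequencias
  congr 1
  rw [show PySem.Str.len m = ((m.toList.length : Int)) from rfl,
      pvRange m.toList.length t, List.foldl_map]
  rw [List.foldl_ext _ (fun d k =>
        if !(((m.toList.drop k).take t).contains ' ')
        then d.insert (String.ofList ((m.toList.drop k).take t))
               (d.getD (String.ofList ((m.toList.drop k).take t)) 0 + 1) else d)
      PySem.Dict.empty
      (by
        intro d k _
        rw [pvSliceStr m k t, PySem.Str.isIn_eq, String.toList_ofList, pvIsIn_single,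
            pvStepA, String.toList_ofList])]
  simp only [pvFoldl_if_filter]
  rw [show (pvW t m.toList).filter (fun w => !w.contains ' ') =
        ((List.range (m.toList.length + 1 - t)).filter
          (fun k => !(((m.toList.drop k).take t).contains ' '))).map
          (fun i => (m.toList.drop i).take t) from by
        unfold pvW; rw [List.filter_map]; rfl]
  rw [List.map_map, ← PySem.Dict.foldl_insert_getD_add_one_eq_counter, List.foldl_map]
  rfl

-- B's block list is the runs' windows
theorem pvB_blocks (m : String) (t : Nat) :
    ((PySem.Str.split? m " ").getD []).flatMap
      (fun trecho =>
        (PySem.List.pyRange 0 (PySem.Str.len trecho - (t : Int) + 1) 1).map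
          (fun j => PySem.Str.slice trecho (some j) (some (j + (t : Int))))) =
      ((List.splitOnP (· == ' ') m.toList).flatMap (pvW t)).map String.ofList := by
  have hsplit : PySem.Str.split? m " " =
      some ((List.splitOnP (· == ' ') m.toList).map String.ofList) := by
    unfold PySem.Str.split? PySem.Chars.split?
    rw [show (" " : String).toList = [' '] from by decide]
    rw [show ([' '] : List Char).isEmpty = false from rfl]
    rw [pvSplitOn_single ' ' m.toList]
    simp
  rw [hsplit, Option.getD_some, List.flatMap_map, List.map_flatMap]
  apply List.flatMap_congr  -- pointwise: each run's slice list is its window list, mapped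
  intro r _
  rw [show PySem.Str.len (String.ofList r) = ((r.length : Int)) from by
        unfold PySem.Str.len; rw [String.toList_ofList]]
  rw [pvRange r.length t, List.map_map]
  unfold pvW
  rw [List.map_map]
  apply List.map_congr_left
  intro k _
  simp only [Function.comp]
  rw [pvSliceStr (String.ofList r) k t, String.toList_ofList]

-- B is Counter(blocks) rendered by the comprehension over first-seen-distinct blocks
theorem pvB_eq (m : String) (t : Nat) :
    calculaFrequencias_alt m (t : Int) =
      (PySem.Dict.counter (((List.splitOnP (· == ' ') m.toList).flatMap (pvW t)).map
        String.ofList)).items := by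
  unfold calculaFrequencias_alt
  simp only [pvB_blocks m t]
  set bl := ((List.splitOnP (· == ' ') m.toList).flatMap (pvW t)).map String.ofList with hbl
  rw [PySem.List.dedup_eq_ofList]
  rw [PySem.Dict.items_foldl_insert_fresh (PySem.Set.ofList bl) (fun b => b)
        (fun b => ((PySem.List.count bl b : Nat) : Int)) PySem.Dict.empty
        (fun a _ => PySem.Dict.contains_empty a)
        (by rw [List.map_id']; exact PySem.Set.nodup_ofList bl)]
  rw [PySem.Dict.items_counter]
  simp only [PySem.List.count_eq]
  rw [show (PySem.Dict.empty : PySem.Dict String Int).items = [] from rfl, List.nil_append]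

-- ===== VERDICT (by name: the statement is the Claim_ definition above) =====
theorem calculaFrequencias_spec : Claim_equal_calculaFrequencias := by
  intro mensagem tamBloco _hdom hpre
  unfold Spec_calculaFrequencias
  obtain ⟨t, rfl⟩ := Int.eq_ofNat_of_zero_le hpre
  rw [pvA_eq mensagem t, pvB_eq mensagem t, pvBlocks t mensagem.toList]
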